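-- pv_equiv track=rewrite | github.com/imyousuf/collab-editor | packages/provider-sdk-py/collab_editor_provider/blame.py | _apply_diff_attribution
-- ===== SOURCE A (Python) =====
-- def _apply_diff_attribution(
--     old_lines: list[str],
--     new_lines: list[str],
--     old_authors: list[str],
--     creator: str,
-- ) -> list[str]:
--     lcs = _compute_lcs(old_lines, new_lines)
--     new_authors = [creator] * len(new_lines)
--
--     for old_idx, new_idx in lcs:
--         if old_idx < len(old_authors):
--             new_authors[new_idx] = old_authors[old_idx]
--         else:
--             new_authors[new_idx] = creator
--
--     return new_authors
--
-- def _compute_lcs(a: list[str], b: list[str]) -> list[tuple[int, int]]: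
--     """Compute LCS indices between two string lists. Returns (old_idx, new_idx) pairs."""
--     m, n = len(a), len(b)
--     dp = [[0] * (n + 1) for _ in range(m + 1)]
--
--     for i in range(1, m + 1):
--         for j in range(1, n + 1):
--             if a[i - 1] == b[j - 1]:
--                 dp[i][j] = dp[i - 1][j - 1] + 1
--             else:
--                 dp[i][j] = max(dp[i - 1][j], dp[i][j - 1])
--
--     result: list[tuple[int, int]] = []
--     i, j = m, n
--     while i > 0 and j > 0:
--         if a[i - 1] == b[j - 1]:
--             result.append((i - 1, j - 1))
--             i -= 1
--             j -= 1
--         elif dp[i - 1][j] >= dp[i][j - 1]: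
--             i -= 1
--         else:
--             j -= 1
--
--     return list(reversed(result))
-- ===== SOURCE B (Python) =====
-- def _apply_diff_attribution(
--     old_lines: list[str],
--     new_lines: list[str],
--     old_authors: list[str],
--     creator: str,
-- ) -> list[str]:
--     # Single forward pass with two rolling rows: each cell carries (lcs_len,
--     # chosen-pairs linked list) so the selected pair list is built during the
--     # fill (structure-sharing cons cells) and no dp table or backtrack exists.
--     n = len(new_lines)
--     row = [(0, None)] * (n + 1)
--     for i in range(1, len(old_lines) + 1):
--         prev = row
--         row = [(0, None)] * (n + 1)
--         for j in range(1, n + 1):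
--             if old_lines[i - 1] == new_lines[j - 1]:
--                 ln, ps = prev[j - 1]
--                 row[j] = (ln + 1, ((i - 1, j - 1), ps))
--             elif prev[j][0] >= row[j - 1][0]:
--                 row[j] = prev[j]
--             else:
--                 row[j] = row[j - 1]
--
--     pairs = []
--     ps = row[n][1]
--     while ps is not None:
--         head, ps = ps
--         pairs.append(head)
--
--     new_authors = [creator] * n
--     for old_idx, new_idx in reversed(pairs):
--         if old_idx < len(old_authors):
--             new_authors[new_idx] = old_authors[old_idx]
--         else:
--             new_authors[new_idx] = creator
--     return new_authors
-- ===== Notes on version B (the rewrite author's own statement) =====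
-- stated objective: faster
-- what changed: B replaces A's full (m+1)x(n+1) dp table plus backward tie-broken walk by a single forward pass over two rolling rows whose cells carry (lcs length, chosen-pair linked list with structure sharing), so the chosen pairs are built during the fill and the table and the backtrack disappear.
import Mathlib
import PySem

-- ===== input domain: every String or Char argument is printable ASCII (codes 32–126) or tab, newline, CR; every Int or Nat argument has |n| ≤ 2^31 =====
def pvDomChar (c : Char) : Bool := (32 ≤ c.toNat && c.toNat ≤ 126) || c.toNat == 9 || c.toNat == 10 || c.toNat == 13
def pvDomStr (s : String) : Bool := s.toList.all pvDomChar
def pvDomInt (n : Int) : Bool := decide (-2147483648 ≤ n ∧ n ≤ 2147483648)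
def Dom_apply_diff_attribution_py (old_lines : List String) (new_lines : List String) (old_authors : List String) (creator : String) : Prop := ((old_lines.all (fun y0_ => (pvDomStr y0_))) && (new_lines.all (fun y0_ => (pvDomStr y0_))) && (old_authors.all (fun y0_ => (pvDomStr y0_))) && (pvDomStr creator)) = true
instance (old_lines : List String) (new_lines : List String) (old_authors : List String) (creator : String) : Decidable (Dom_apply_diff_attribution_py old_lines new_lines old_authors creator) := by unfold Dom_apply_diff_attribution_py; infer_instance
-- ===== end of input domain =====

-- B replaces A's full dp table + backward walk by one forward pass over rolling rows
-- whose cells carry (length, chosen-pair list), removing the table and the backtrack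
-- (objective: faster; same asymptotic time, a measured constant-factor win from O(n) rolling rows instead of an O(m*n) table).

-- ===== PORT A =====
-- dp[i][j] read/write on the rectangular table (indices are always in range in A)
def pvDpGet (dp : List (List Int)) (i j : Nat) : Int := (dp.getD i []).getD j 0
def pvDpSet (dp : List (List Int)) (i j : Nat) (v : Int) : List (List Int) :=
  dp.set i ((dp.getD i []).set j v)

-- body of A's inner `for j in range(1, n + 1)` loop
def pvInnerA (a b : List String) (i : Nat) (dp : List (List Int)) (j : Nat) : List (List Int) :=
  if a.getD (i - 1) "" = b.getD (j - 1) "" then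
    pvDpSet dp i j (pvDpGet dp (i - 1) (j - 1) + 1)
  else
    pvDpSet dp i j (max (pvDpGet dp (i - 1) j) (pvDpGet dp i (j - 1)))

-- body of A's outer `for i in range(1, m + 1)` loop
def pvOuterA (a b : List String) (dp : List (List Int)) (i : Nat) : List (List Int) :=
  (List.range' 1 b.length).foldl (pvInnerA a b i) dp

def pvLcsTable (a b : List String) : List (List Int) :=
  (List.range' 1 a.length).foldl (pvOuterA a b)
    (List.replicate (a.length + 1) (List.replicate (b.length + 1) (0 : Int)))

-- A's `while i > 0 and j > 0` backtrack, appending matched pairs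
def pvBacktrack (a b : List String) (dp : List (List Int)) :
    Nat → Nat → List (Int × Int) → List (Int × Int)
  | i + 1, j + 1, acc =>
    if a.getD i "" = b.getD j "" then
      pvBacktrack a b dp i j (acc ++ [((i : Int), (j : Int))])
    else if pvDpGet dp i (j + 1) ≥ pvDpGet dp (i + 1) j then
      pvBacktrack a b dp i (j + 1) acc
    else
      pvBacktrack a b dp (i + 1) j acc
  | _, _, acc => acc
  termination_by i j _ => i + j

def pvComputeLcs (a b : List String) : List (Int × Int) :=
  (pvBacktrack a b (pvLcsTable a b) a.length b.length []).reverse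

-- A's attribution loop body; the pair indices A produces are always ≥ 0 and in
-- range, so `.toNat` and `getD` are exact here
def pvAssignA (old_authors : List String) (creator : String)
    (na : List String) (p : Int × Int) : List String :=
  na.set p.2.toNat
    (if p.1 < (old_authors.length : Int) then old_authors.getD p.1.toNat "" else creator)

def apply_diff_attribution_py (old_lines : List String) (new_lines : List String) (old_authors : List String) (creator : String) : List String :=
  (pvComputeLcs old_lines new_lines).foldl (pvAssignA old_authors creator)
    (List.replicate new_lines.length creator)

-- ===== PORT B =====
-- body of B's inner loop: each cell is (lcs length, chosen pairs, newest first)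
def pvInnerB (a b : List String) (i : Nat) (prev : List (Int × List (Int × Int)))
    (row : List (Int × List (Int × Int))) (j : Nat) : List (Int × List (Int × Int)) :=
  if a.getD (i - 1) "" = b.getD (j - 1) "" then
    let c := prev.getD (j - 1) (0, [])
    row.set j (c.1 + 1, (((i - 1 : Nat) : Int), ((j - 1 : Nat) : Int)) :: c.2)
  else if (prev.getD j (0, [])).1 ≥ (row.getD (j - 1) (0, [])).1 then
    row.set j (prev.getD j (0, []))
  else
    row.set j (row.getD (j - 1) (0, []))

-- body of B's outer loop: build row i from row i-1
def pvRowB (a b : List String) (prev : List (Int × List (Int × Int))) (i : Nat) :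
    List (Int × List (Int × Int)) :=
  (List.range' 1 b.length).foldl (pvInnerB a b i prev)
    (List.replicate (b.length + 1) ((0 : Int), ([] : List (Int × Int))))

def pvFinalRow (a b : List String) : List (Int × List (Int × Int)) :=
  (List.range' 1 a.length).foldl (pvRowB a b)
    (List.replicate (b.length + 1) ((0 : Int), ([] : List (Int × Int))))

-- B's `while ps is not None` unwinding of the linked list into `pairs`
def pvUnwind : List (Int × Int) → List (Int × Int)
  | [] => []
  | p :: ps => p :: pvUnwind ps

-- B's attribution loop body (textually the same loop as A's, per the source)
def pvAssignB (old_authors : List String) (creator : String)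
    (na : List String) (p : Int × Int) : List String :=
  na.set p.2.toNat
    (if p.1 < (old_authors.length : Int) then old_authors.getD p.1.toNat "" else creator)

def apply_diff_attribution_py_alt (old_lines : List String) (new_lines : List String) (old_authors : List String) (creator : String) : List String :=
  (pvUnwind ((pvFinalRow old_lines new_lines).getD new_lines.length ((0 : Int), [])).2).reverse.foldl
    (pvAssignB old_authors creator) (List.replicate new_lines.length creator)

-- ===== PRECONDITION & SPEC =====
def Spec_apply_diff_attribution_py (old_lines : List String) (new_lines : List String) (old_authors : List String) (creator : String) (out : List String) : Prop := out = apply_diff_attribution_py_alt old_lines new_lines old_authors creator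
instance (old_lines : List String) (new_lines : List String) (old_authors : List String) (creator : String) (out : List String) : Decidable (Spec_apply_diff_attribution_py old_lines new_lines old_authors creator out) := by unfold Spec_apply_diff_attribution_py; infer_instance

-- ===== CLAIM (what is proved, stated in full; the proofs are below) =====
def Claim_equal_apply_diff_attribution_py : Prop := ∀ (old_lines : List String) (new_lines : List String) (old_authors : List String) (creator : String), Dom_apply_diff_attribution_py old_lines new_lines old_authors creator → Spec_apply_diff_attribution_py old_lines new_lines old_authors creator (apply_diff_attribution_py old_lines new_lines old_authors creator)

-- ===== LEMMAS AND PROOFS =====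

theorem pv_getD_set {α : Type} (l : List α) (i j : Nat) (a d : α) :
    (l.set i a).getD j d = if i = j ∧ i < l.length then a else l.getD j d := by
  by_cases h : i = j ∧ i < l.length
  · obtain ⟨rfl, hlt⟩ := h
    simp [List.getD_eq_getElem?_getD, hlt]
  · rw [if_neg h]
    by_cases he : i = j
    · subst he
      have h2 : l.length ≤ i := by by_contra hh; exact h ⟨rfl, by omega⟩
      rw [List.set_eq_of_length_le h2]
    · simp [List.getD_eq_getElem?_getD, List.getElem?_set_ne he]

theorem pv_getD_replicate {α : Type} (n i : Nat) (a d : α) :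
    (List.replicate n a).getD i d = if i < n then a else d := by
  by_cases h : i < n <;> simp [List.getD_eq_getElem?_getD, h]

-- the LCS-length recurrence both programs implement
def pvL (a b : List String) : Nat → Nat → Int
  | 0, _ => 0
  | _ + 1, 0 => 0
  | i + 1, j + 1 =>
    if a.getD i "" = b.getD j "" then pvL a b i j + 1
    else max (pvL a b i (j + 1)) (pvL a b (i + 1) j)
  termination_by i j => i + j

-- the pair list A's backtrack emits from cell (i, j) (newest pair first)
def pvW (a b : List String) : Nat → Nat → List (Int × Int)
  | 0, _ => []
  | _ + 1, 0 => []
  | i + 1, j + 1 =>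
    if a.getD i "" = b.getD j "" then ((i : Int), (j : Int)) :: pvW a b i j
    else if pvL a b i (j + 1) ≥ pvL a b (i + 1) j then pvW a b i (j + 1)
    else pvW a b (i + 1) j
  termination_by i j => i + j

theorem pvL_zero (a b : List String) {i j : Nat} (h : i = 0 ∨ j = 0) : pvL a b i j = 0 := by
  rcases h with rfl | rfl
  · cases j <;> simp [pvL]
  · cases i <;> simp [pvL]

theorem pvW_zero (a b : List String) {i j : Nat} (h : i = 0 ∨ j = 0) : pvW a b i j = [] := by
  rcases h with rfl | rfl
  · cases j <;> simp [pvW]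
  · cases i <;> simp [pvW]

-- table shape
def pvShape (m n : Nat) (dp : List (List Int)) : Prop :=
  dp.length = m + 1 ∧ ∀ r : Nat, r ≤ m → (dp.getD r []).length = n + 1

theorem pvShape_set {m n : Nat} {dp : List (List Int)} (h : pvShape m n dp)
    (i j : Nat) (v : Int) : pvShape m n (pvDpSet dp i j v) := by
  obtain ⟨hlen, hrow⟩ := h
  refine ⟨by simp [pvDpSet, hlen], ?_⟩
  intro r hr
  unfold pvDpSet
  rw [pv_getD_set]
  split_ifs with hc
  · have h2 := hc.2
    rw [List.length_set]
    exact hrow i (by omega)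
  · exact hrow r hr

theorem pvGet_set {m n : Nat} {dp : List (List Int)} (h : pvShape m n dp)
    {i j : Nat} (hi : i ≤ m) (hj : j ≤ n) (v : Int) (i' j' : Nat) :
    pvDpGet (pvDpSet dp i j v) i' j' = if i' = i ∧ j' = j then v else pvDpGet dp i' j' := by
  obtain ⟨hlen, hrow⟩ := h
  unfold pvDpGet pvDpSet
  rw [pv_getD_set]
  by_cases he : i = i'
  · subst he
    rw [if_pos ⟨rfl, by omega⟩]
    rw [pv_getD_set]
    rw [hrow i hi]
    by_cases hj' : j = j'
    · subst hj'
      rw [if_pos ⟨rfl, by omega⟩, if_pos ⟨rfl, rfl⟩]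
    · rw [if_neg (by tauto), if_neg (by tauto)]
  · rw [if_neg (by tauto), if_neg (by tauto)]

-- invariant of A's nested fill: rows below `rows` done, row `rows` done up to `cols`
def pvInvA (a b : List String) (rows cols : Nat) (dp : List (List Int)) : Prop :=
  pvShape a.length b.length dp ∧
  ∀ i j : Nat, i ≤ a.length → j ≤ b.length →
    pvDpGet dp i j =
      if 1 ≤ i ∧ 1 ≤ j ∧ (i < rows ∨ (i = rows ∧ j ≤ cols)) then pvL a b i j else 0

theorem pvInvA_write (a b : List String) (i j : Nat) (hi1 : 1 ≤ i) (hi : i ≤ a.length)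
    (hj1 : 1 ≤ j) (hj : j ≤ b.length) (dp : List (List Int))
    (h : pvInvA a b i (j - 1) dp) (v : Int) (hv : v = pvL a b i j) :
    pvInvA a b i j (pvDpSet dp i j v) := by
  obtain ⟨hs, hval⟩ := h
  refine ⟨pvShape_set hs i j v, ?_⟩
  intro i' j' hi' hj'
  rw [pvGet_set hs hi hj]
  split_ifs with hc hc2 hc2
  · obtain ⟨rfl, rfl⟩ := hc; exact hv
  · obtain ⟨rfl, rfl⟩ := hc; exfalso; omega
  · rw [hval i' j' hi' hj', if_pos (by omega)]
  · rw [hval i' j' hi' hj', if_neg (by omega)]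

theorem pvL_succ (a b : List String) (i j : Nat) :
    pvL a b (i + 1) (j + 1) =
      if a.getD i "" = b.getD j "" then pvL a b i j + 1
      else max (pvL a b i (j + 1)) (pvL a b (i + 1) j) := by
  rw [pvL]

theorem pvW_succ (a b : List String) (i j : Nat) :
    pvW a b (i + 1) (j + 1) =
      if a.getD i "" = b.getD j "" then ((i : Int), (j : Int)) :: pvW a b i j
      else if pvL a b i (j + 1) ≥ pvL a b (i + 1) j then pvW a b i (j + 1)
      else pvW a b (i + 1) j := by
  rw [pvW]

theorem pvInvA_step (a b : List String) (i j : Nat) (hi1 : 1 ≤ i) (hi : i ≤ a.length)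
    (hj1 : 1 ≤ j) (hj : j ≤ b.length) (dp : List (List Int))
    (h : pvInvA a b i (j - 1) dp) : pvInvA a b i j (pvInnerA a b i dp j) := by
  obtain ⟨k, rfl⟩ : ∃ k, i = k + 1 := ⟨i - 1, by omega⟩
  obtain ⟨l, rfl⟩ : ∃ l, j = l + 1 := ⟨j - 1, by omega⟩
  have hval := h.2
  have r11 : pvDpGet dp k l = pvL a b k l := by
    rw [hval k l (by omega) (by omega)]
    split_ifs with hc
    · rfl
    · rw [pvL_zero a b (by omega)]
  have r10 : pvDpGet dp k (l + 1) = pvL a b k (l + 1) := by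
    rw [hval k (l + 1) (by omega) (by omega)]
    split_ifs with hc
    · rfl
    · rw [pvL_zero a b (by omega)]
  have r01 : pvDpGet dp (k + 1) l = pvL a b (k + 1) l := by
    rw [hval (k + 1) l (by omega) (by omega)]
    split_ifs with hc
    · rfl
    · rw [pvL_zero a b (by omega)]
  unfold pvInnerA
  simp only [Nat.add_sub_cancel]
  split_ifs with t
  · exact pvInvA_write a b (k + 1) (l + 1) hi1 hi hj1 hj dp h _
      (by rw [pvL_succ, if_pos t, r11])
  · exact pvInvA_write a b (k + 1) (l + 1) hi1 hi hj1 hj dp h _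
      (by rw [pvL_succ, if_neg t, r10, r01])

theorem pvInvA_innerFold (a b : List String) (i : Nat) (hi1 : 1 ≤ i) (hi : i ≤ a.length)
    (dp : List (List Int)) (h : pvInvA a b i 0 dp) :
    ∀ k, k ≤ b.length → pvInvA a b i k ((List.range' 1 k).foldl (pvInnerA a b i) dp) := by
  intro k
  induction k with
  | zero => intro _; simpa using h
  | succ k ih =>
    intro hk
    rw [List.range'_1_concat, List.foldl_append]
    have h1k : 1 + k = k + 1 := Nat.add_comm 1 k
    rw [h1k]
    have := pvInvA_step a b i (k + 1) hi1 hi (by omega) hk _ (by simpa using ih (by omega))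
    simpa using this

theorem pvInvA_shift (a b : List String) (r : Nat) (dp : List (List Int))
    (h : pvInvA a b r b.length dp) : pvInvA a b (r + 1) 0 dp := by
  obtain ⟨hs, hval⟩ := h
  refine ⟨hs, ?_⟩
  intro i j hi hj
  rw [hval i j hi hj]
  split_ifs with h1 h2 h2
  · rfl
  · exfalso; omega
  · exfalso; omega
  · rfl

theorem pvInvA_init (a b : List String) :
    pvInvA a b 0 b.length
      (List.replicate (a.length + 1) (List.replicate (b.length + 1) (0 : Int))) := by
  constructor
  · constructor
    · simp
    · intro r hr
      rw [pv_getD_replicate, if_pos (by omega)]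
      simp
  · intro i j hi hj
    rw [if_neg (by omega)]
    unfold pvDpGet
    rw [pv_getD_replicate]
    split_ifs with hc
    · rw [pv_getD_replicate]; split_ifs <;> rfl
    · simp

theorem pvInvA_outerFold (a b : List String) :
    ∀ r, r ≤ a.length → pvInvA a b r b.length
      ((List.range' 1 r).foldl (pvOuterA a b)
        (List.replicate (a.length + 1) (List.replicate (b.length + 1) (0 : Int)))) := by
  intro r
  induction r with
  | zero => intro _; simpa using pvInvA_init a b
  | succ r ih =>
    intro hr
    rw [List.range'_1_concat, List.foldl_append]
    have h1r : 1 + r = r + 1 := Nat.add_comm 1 r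
    rw [h1r]
    simp only [List.foldl_cons, List.foldl_nil]
    have h1 := pvInvA_shift a b r _ (ih (by omega))
    have h2 := pvInvA_innerFold a b (r + 1) (by omega) hr _ h1 b.length le_rfl
    simpa [pvOuterA] using h2

theorem pvTable_correct (a b : List String) {i j : Nat} (hi : i ≤ a.length) (hj : j ≤ b.length) :
    pvDpGet (pvLcsTable a b) i j = pvL a b i j := by
  have h := (pvInvA_outerFold a b a.length le_rfl).2 i j hi hj
  unfold pvLcsTable
  rw [h]
  split_ifs with hc
  · rfl
  · rw [pvL_zero a b (by omega)]

theorem pvBacktrack_main (a b : List String) :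
    ∀ s i j, i + j ≤ s → i ≤ a.length → j ≤ b.length → ∀ acc,
      pvBacktrack a b (pvLcsTable a b) i j acc = acc ++ pvW a b i j := by
  intro s
  induction s with
  | zero =>
    intro i j hs hi hj acc
    obtain rfl : i = 0 := by omega
    rw [pvW_zero a b (Or.inl rfl)]
    simp [pvBacktrack]
  | succ s ih =>
    intro i j hs hi hj acc
    match i, j with
    | 0, j =>
      rw [pvW_zero a b (Or.inl rfl)]
      simp [pvBacktrack]
    | i + 1, 0 =>
      rw [pvW_zero a b (Or.inr rfl)]
      simp [pvBacktrack]
    | i + 1, j + 1 =>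
      rw [pvBacktrack, pvW_succ]
      have c10 := pvTable_correct a b (i := i) (j := j + 1) (by omega) hj
      have c01 := pvTable_correct a b (i := i + 1) (j := j) hi (by omega)
      by_cases t : a.getD i "" = b.getD j ""
      · rw [if_pos t, if_pos t, ih i j (by omega) (by omega) (by omega)]
        simp
      · rw [if_neg t, if_neg t, c10, c01]
        by_cases hcmp : pvL a b i (j + 1) ≥ pvL a b (i + 1) j
        · rw [if_pos hcmp, if_pos hcmp]
          exact ih i (j + 1) (by omega) (by omega) hj acc
        · rw [if_neg hcmp, if_neg hcmp]
          exact ih (i + 1) j (by omega) hi (by omega) acc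

-- B side: a completed row r
def pvRowInv (a b : List String) (r : Nat) (row : List (Int × List (Int × Int))) : Prop :=
  row.length = b.length + 1 ∧
  ∀ j : Nat, j ≤ b.length → row.getD j (0, []) = (pvL a b r j, pvW a b r j)

-- B side: row i under construction, columns 1..k written
def pvRowPart (a b : List String) (i k : Nat) (row : List (Int × List (Int × Int))) : Prop :=
  row.length = b.length + 1 ∧
  ∀ j : Nat, j ≤ b.length →
    row.getD j (0, []) = if 1 ≤ j ∧ j ≤ k then (pvL a b i j, pvW a b i j) else (0, [])

theorem pvRowPart_step (a b : List String) (i j : Nat) (hi1 : 1 ≤ i) (hj1 : 1 ≤ j)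
    (hj : j ≤ b.length) (prev row : List (Int × List (Int × Int)))
    (hprev : pvRowInv a b (i - 1) prev) (h : pvRowPart a b i (j - 1) row) :
    pvRowPart a b i j (pvInnerB a b i prev row j) := by
  obtain ⟨k, rfl⟩ : ∃ k, i = k + 1 := ⟨i - 1, by omega⟩
  obtain ⟨l, rfl⟩ : ∃ l, j = l + 1 := ⟨j - 1, by omega⟩
  obtain ⟨hplen, hpval⟩ := hprev
  obtain ⟨hrlen, hrval⟩ := h
  simp only [Nat.add_sub_cancel] at hpval hrval ⊢
  have p11 : prev.getD l (0, []) = (pvL a b k l, pvW a b k l) := hpval l (by omega)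
  have p10 : prev.getD (l + 1) (0, []) = (pvL a b k (l + 1), pvW a b k (l + 1)) :=
    hpval (l + 1) hj
  have p01 : row.getD l (0, []) = (pvL a b (k + 1) l, pvW a b (k + 1) l) := by
    rw [hrval l (by omega)]
    split_ifs with hc
    · rfl
    · rw [pvL_zero a b (by omega), pvW_zero a b (by omega)]
  have hwrite : ∀ c : Int × List (Int × Int), c = (pvL a b (k + 1) (l + 1), pvW a b (k + 1) (l + 1)) →
      pvRowPart a b (k + 1) (l + 1) (row.set (l + 1) c) := by
    intro c hc
    refine ⟨by simpa using hrlen, ?_⟩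
    intro j' hj'
    rw [pv_getD_set]
    split_ifs with h1 h2 h2
    · obtain ⟨rfl, _⟩ := h1; exact hc
    · exfalso; omega
    · rw [hrval j' hj', if_pos (by omega)]
    · rw [hrval j' hj']
      split_ifs with h3
      · exfalso; omega
      · rfl
  unfold pvInnerB
  simp only [Nat.add_sub_cancel]
  split_ifs with t hcmp
  · apply hwrite
    rw [p11, pvL_succ, pvW_succ, if_pos t, if_pos t]
  · rw [p10, p01] at hcmp
    apply hwrite
    rw [p10, pvL_succ, pvW_succ, if_neg t, if_neg t, if_pos hcmp,
      max_eq_left hcmp]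
  · rw [p10, p01] at hcmp
    apply hwrite
    rw [p01, pvL_succ, pvW_succ, if_neg t, if_neg t, if_neg hcmp,
      max_eq_right (by omega)]

theorem pvRowB_inv (a b : List String) (i : Nat) (hi1 : 1 ≤ i)
    (prev : List (Int × List (Int × Int))) (hprev : pvRowInv a b (i - 1) prev) :
    pvRowInv a b i (pvRowB a b prev i) := by
  have init : pvRowPart a b i 0
      (List.replicate (b.length + 1) ((0 : Int), ([] : List (Int × Int)))) := by
    refine ⟨by simp, ?_⟩
    intro j hj
    rw [pv_getD_replicate, if_pos (by omega), if_neg (by omega)]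
  have fold : ∀ k, k ≤ b.length → pvRowPart a b i k
      ((List.range' 1 k).foldl (pvInnerB a b i prev)
        (List.replicate (b.length + 1) ((0 : Int), ([] : List (Int × Int))))) := by
    intro k
    induction k with
    | zero => intro _; simpa using init
    | succ k ih =>
      intro hk
      rw [List.range'_1_concat, List.foldl_append]
      have h1k : 1 + k = k + 1 := Nat.add_comm 1 k
      rw [h1k]
      have := pvRowPart_step a b i (k + 1) hi1 (by omega) hk prev _ hprev
        (by simpa using ih (by omega))
      simpa using this
  obtain ⟨hlen, hval⟩ := fold b.length le_rfl
  unfold pvRowB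
  refine ⟨hlen, ?_⟩
  intro j hj
  rw [hval j hj]
  split_ifs with hc
  · rfl
  · rw [pvL_zero a b (by omega), pvW_zero a b (by omega)]

theorem pvFinalRow_inv (a b : List String) :
    ∀ r, r ≤ a.length → pvRowInv a b r
      ((List.range' 1 r).foldl (pvRowB a b)
        (List.replicate (b.length + 1) ((0 : Int), ([] : List (Int × Int))))) := by
  intro r
  induction r with
  | zero =>
    intro _
    simp only [List.range'_zero, List.foldl_nil]
    refine ⟨by simp, ?_⟩
    intro j hj
    rw [pv_getD_replicate, if_pos (by omega), pvL_zero a b (Or.inl rfl),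
      pvW_zero a b (Or.inl rfl)]
  | succ r ih =>
    intro hr
    rw [List.range'_1_concat, List.foldl_append]
    have h1r : 1 + r = r + 1 := Nat.add_comm 1 r
    rw [h1r]
    simp only [List.foldl_cons, List.foldl_nil]
    have := pvRowB_inv a b (r + 1) (by omega) _ (by simpa using ih (by omega))
    simpa using this

theorem pvUnwind_eq : ∀ l : List (Int × Int), pvUnwind l = l := by
  intro l
  induction l with
  | nil => rfl
  | cons p ps ih => simp [pvUnwind, ih]

theorem pvAssign_eq : pvAssignA = pvAssignB := rfl

-- ===== VERDICT (by name: the statement is the Claim_ definition above) =====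
theorem apply_diff_attribution_py_spec : Claim_equal_apply_diff_attribution_py := by
  intro old_lines new_lines old_authors creator _
  unfold Spec_apply_diff_attribution_py
  unfold apply_diff_attribution_py apply_diff_attribution_py_alt pvComputeLcs
  have hA := pvBacktrack_main old_lines new_lines (old_lines.length + new_lines.length)
    old_lines.length new_lines.length le_rfl le_rfl le_rfl []
  have hB := (pvFinalRow_inv old_lines new_lines old_lines.length le_rfl).2
    new_lines.length le_rfl
  rw [hA]
  unfold pvFinalRow
  rw [hB, pvUnwind_eq, pvAssign_eq]
  simp
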